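-- pv_equiv track=rewrite | github.com/vietho88/SGC_2 | Service_Coop_Food/Service/views/detail/view_detail.py | split_result_check_luoi
-- ===== SOURCE A (Python) =====
-- def split_result_check_luoi(l, n):
--     if len(l) < n:
--         return '††††'
--     list_temp1 = []
--     list_temp2 = []
--     for (i, x) in enumerate(l, start=1):
--         if i % n == 0:
--             list_temp1.append(x.strip())
--             tem_str = '†'.join(list_temp1)
--             list_temp2.append(tem_str)
--             list_temp1 = []
--         else:
--             list_temp1.append(x.strip())
--
--     return '‡'.join(list_temp2)
-- ===== SOURCE B (Python) =====
-- def split_result_check_luoi(l, n):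
--     if len(l) < n:
--         return '††††'
--     full = len(l) - len(l) % n
--     return '‡'.join(
--         '†'.join(x.strip() for x in l[i:i + n])
--         for i in range(0, full, n)
--     )
-- ===== Notes on version B (the rewrite author's own statement) =====
-- stated objective: simpler
-- what changed: A accumulates elements one by one into a temporary buffer flushed whenever an enumerate counter hits a multiple of n; B computes the number of full chunks from len(l) up front and builds each chunk directly by slicing, so the two temporary buffers and the modulo counter disappear.
-- outside the precondition, e.g. on split_result_check_luoi([], 0): A returns '', B raises ZeroDivisionError; on split_result_check_luoi(['a', 'b'], -2): A returns 'a†b', B returns ''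
import Mathlib
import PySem

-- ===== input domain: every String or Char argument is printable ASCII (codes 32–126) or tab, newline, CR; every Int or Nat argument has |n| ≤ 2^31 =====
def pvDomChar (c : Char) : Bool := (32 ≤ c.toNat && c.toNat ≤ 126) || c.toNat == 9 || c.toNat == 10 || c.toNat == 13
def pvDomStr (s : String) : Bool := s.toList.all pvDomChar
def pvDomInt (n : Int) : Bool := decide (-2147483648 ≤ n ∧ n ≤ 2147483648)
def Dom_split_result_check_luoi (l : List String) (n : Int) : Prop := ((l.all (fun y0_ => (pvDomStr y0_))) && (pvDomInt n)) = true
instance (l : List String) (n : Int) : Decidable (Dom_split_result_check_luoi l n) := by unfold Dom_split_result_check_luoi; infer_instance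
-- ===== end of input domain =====

-- B replaces A's element-by-element modulo-counter buffers with a direct loop over chunk start
-- positions and slicing (simpler decomposition; no asymptotic change).

-- ===== PORT A =====
-- the loop body of A: state = (list_temp1, list_temp2), element = (i, x) from enumerate(l, 1)
def pvStepA (n : Int) (st : List String × List String) (p : Int × String) :
    List String × List String :=
  if PySem.Int.mod p.1 n = 0 then
    ([], st.2 ++ [PySem.Str.join "†" (st.1 ++ [PySem.Str.strip p.2])])
  else
    (st.1 ++ [PySem.Str.strip p.2], st.2)

def split_result_check_luoi (l : List String) (n : Int) : String :=
  if PySem.List.len l < n then "††††"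
  else
    let st := (PySem.List.enumerate l 1).foldl (pvStepA n) ([], [])
    PySem.Str.join "‡" st.2

-- ===== PORT B =====
def split_result_check_luoi_alt (l : List String) (n : Int) : String :=
  if PySem.List.len l < n then "††††"
  else
    let full := PySem.List.len l - PySem.Int.mod (PySem.List.len l) n
    PySem.Str.join "‡"
      ((PySem.List.pyRange 0 full n).map (fun i =>
        PySem.Str.join "†" ((PySem.List.slice l (some i) (some (i + n))).map PySem.Str.strip)))

-- ===== PRECONDITION & SPEC =====
-- Pre_ excludes n = 0, where A raises ZeroDivisionError on nonempty l (and on empty l returns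
-- '' only because its guard short-circuits the loop, while B's modulo raises), and n < 0 with
-- len(l) >= |n|, where A's `i % n == 0` test accidentally chunks by |n| (an artefact of
-- Python's divisor-signed modulo) while B's positive-step range produces ''.
def Pre_split_result_check_luoi (l : List String) (n : Int) : Prop :=
  1 ≤ n ∨ (n ≤ -1 ∧ (l.length : Int) < -n)
instance (l : List String) (n : Int) : Decidable (Pre_split_result_check_luoi l n) := by
  unfold Pre_split_result_check_luoi; infer_instance

def pvWitness_split_result_check_luoi : List String × Int := ([" a ", "b", "c"], 2)

def Spec_split_result_check_luoi (l : List String) (n : Int) (out : String) : Prop :=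
  out = split_result_check_luoi_alt l n
instance (l : List String) (n : Int) (out : String) :
    Decidable (Spec_split_result_check_luoi l n out) := by
  unfold Spec_split_result_check_luoi; infer_instance

-- ===== CLAIM (what is proved, stated in full; the proofs are below) =====
def Claim_equal_split_result_check_luoi : Prop :=
  ∀ (l : List String) (n : Int), Dom_split_result_check_luoi l n →
    Pre_split_result_check_luoi l n →
    Spec_split_result_check_luoi l n (split_result_check_luoi l n)

-- ===== LEMMAS AND PROOFS =====

-- the common description of both programs: the joined full chunks of size m
def pvChunks (m : Nat) (l : List String) : List String :=
  if m ≤ l.length ∧ 0 < m then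
    PySem.Str.join "†" ((l.take m).map PySem.Str.strip) :: pvChunks m (l.drop m)
  else []
termination_by l.length
decreasing_by simp only [List.length_drop]; omega

-- A's loop, started at residue r ≠ 0 with too few elements left to reach the next multiple
-- of m, only fills list_temp1.
lemma pvP (m : Nat) (hm : 0 < m) :
    ∀ (l t1 t2 : List String) (i r : Int),
      PySem.Int.mod i (m : Int) = r → 0 < r → r + (l.length : Int) ≤ (m : Int) →
      (PySem.List.enumerate l i).foldl (pvStepA (m : Int)) (t1, t2) =
        (t1 ++ l.map PySem.Str.strip, t2) := by
  intro l
  induction l with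
  | nil => intro t1 t2 i r _ _ _; simp [PySem.List.enumerate_nil]
  | cons x l' ih =>
    intro t1 t2 i r hr hrpos hle
    have hmpos : (0:Int) < (m:Int) := by exact_mod_cast hm
    have hrm : r < (m:Int) := by
      have : (0:Int) ≤ (l'.length : Int) := by positivity
      simp only [List.length_cons] at hle
      push_cast at hle
      omega
    have hne : PySem.Int.mod i (m:Int) ≠ 0 := by rw [hr]; omega
    rw [PySem.List.enumerate_cons, List.foldl_cons]
    have hstep : pvStepA (m:Int) (t1, t2) (i, x) = (t1 ++ [PySem.Str.strip x], t2) := by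
      simp [pvStepA, hne]
    rw [hstep]
    cases l' with
    | nil => simp [PySem.List.enumerate_nil]
    | cons y l'' =>
      have h1 : PySem.Int.mod (i+1) (m:Int) = r + 1 := by
        rw [PySem.Int.mod_eq_emod_of_pos hmpos] at hr ⊢
        have hlen : r + 1 < (m:Int) := by
          simp only [List.length_cons] at hle; push_cast at hle; omega
        have h1m : (1:Int) % (m:Int) = 1 := Int.emod_eq_of_lt (by omega) (by omega)
        calc (i + 1) % (m:Int) = (i % (m:Int) + 1 % (m:Int)) % (m:Int) := Int.add_emod i 1 m
          _ = (r + 1) % (m:Int) := by rw [hr, h1m]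
          _ = r + 1 := Int.emod_eq_of_lt (by omega) (by omega)
      rw [ih (t1 ++ [PySem.Str.strip x]) t2 (i+1) (r+1) h1 (by omega)
        (by simp only [List.length_cons] at hle ⊢; push_cast at hle ⊢; omega)]
      simp

-- A's loop at a chunk boundary consumes exactly the next j elements into one finished chunk.
lemma pvQ (m : Nat) (hm : 0 < m) :
    ∀ (j : Nat), 0 < j → j ≤ m →
    ∀ (l t1 t2 : List String) (i : Int), j ≤ l.length →
      PySem.Int.mod i (m : Int) = (((m - j + 1) % m : Nat) : Int) →
      (PySem.List.enumerate l i).foldl (pvStepA (m : Int)) (t1, t2) =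
        (PySem.List.enumerate (l.drop j) (i + j)).foldl (pvStepA (m : Int))
          ([], t2 ++ [PySem.Str.join "†" (t1 ++ (l.take j).map PySem.Str.strip)]) := by
  intro j
  induction j with
  | zero => intro h; omega
  | succ j ihj =>
    intro _ hjm l t1 t2 i hlen hres
    have hmpos : (0:Int) < (m:Int) := by exact_mod_cast hm
    cases l with
    | nil => simp at hlen
    | cons x l' =>
      rw [PySem.List.enumerate_cons, List.foldl_cons]
      by_cases hj0 : j = 0
      · -- j+1 = 1 : chunk completes at x
        subst hj0
        have hres0 : PySem.Int.mod i (m:Int) = 0 := by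
          rw [hres]
          have h1 : m - (0 + 1) + 1 = m := by omega
          simp [h1]
        rw [show pvStepA (m:Int) (t1, t2) (i, x) =
              ([], t2 ++ [PySem.Str.join "†" (t1 ++ [PySem.Str.strip x])]) by
            simp [pvStepA, hres0]]
        simp
      · -- j ≥ 1, x joins the buffer
        have hj1 : 0 < j := Nat.pos_of_ne_zero hj0
        have hresv : PySem.Int.mod i (m:Int) = ((m - j : Nat) : Int) := by
          rw [hres]; congr 1
          have : m - (j+1) + 1 = m - j := by omega
          rw [this, Nat.mod_eq_of_lt (by omega)]
        have hne : PySem.Int.mod i (m:Int) ≠ 0 := by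
          rw [hresv]
          have : (0:Int) < ((m - j : Nat) : Int) := by exact_mod_cast Nat.sub_pos_of_lt (by omega)
          omega
        rw [show pvStepA (m:Int) (t1, t2) (i, x) =
              (t1 ++ [PySem.Str.strip x], t2) by simp [pvStepA, hne]]
        have hres' : PySem.Int.mod (i+1) (m:Int) = (((m - j + 1) % m : Nat) : Int) := by
          rw [PySem.Int.mod_eq_emod_of_pos hmpos] at hresv ⊢
          have ha : ((m - j : Nat) : Int) % (m:Int) = ((m - j : Nat) : Int) :=
            Int.emod_eq_of_lt (by positivity) (by exact_mod_cast Nat.sub_lt hm hj1)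
          calc (i + 1) % (m:Int) = (i % (m:Int) + 1 % (m:Int)) % (m:Int) := Int.add_emod i 1 m
            _ = (((m - j : Nat) : Int) % (m:Int) + 1 % (m:Int)) % (m:Int) := by rw [hresv, ha]
            _ = (((m - j : Nat) : Int) + 1) % (m:Int) := (Int.add_emod _ 1 _).symm
            _ = (((m - j + 1) % m : Nat) : Int) := by push_cast; ring_nf
        rw [ihj hj1 (by omega) l' (t1 ++ [PySem.Str.strip x]) t2 (i+1)
              (by simpa using hlen) hres']
        simp only [List.drop_succ_cons, List.take_succ_cons, List.map_cons]
        have : i + ((j:Int) + 1) = i + 1 + j := by ring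
        push_cast
        rw [this]
        congr 2
        simp

-- A's whole loop, started at a chunk start, produces exactly the full chunks.
lemma pvAres (m : Nat) (hm : 0 < m) :
    ∀ (N : Nat) (l : List String), l.length ≤ N →
    ∀ (t2 : List String) (i : Int),
      PySem.Int.mod i (m : Int) = PySem.Int.mod 1 (m : Int) →
      ((PySem.List.enumerate l i).foldl (pvStepA (m : Int)) ([], t2)).2 =
        t2 ++ pvChunks m l := by
  intro N
  induction N with
  | zero =>
    intro l hl t2 i _
    have : l = [] := List.length_eq_zero_iff.mp (by omega)
    subst this
    rw [pvChunks]
    simp only [PySem.List.enumerate_nil, List.foldl_nil]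
    simp only [List.length_nil]
    rw [if_neg (by omega)]
    simp
  | succ N ih =>
    intro l hl t2 i hres
    have hmpos : (0:Int) < (m:Int) := by exact_mod_cast hm
    by_cases hlm : l.length < m
    · -- too short: no chunk is completed
      rcases List.eq_nil_or_concat l with hnil | hcon
      · subst hnil
        rw [pvChunks]
        simp only [PySem.List.enumerate_nil, List.foldl_nil]
        simp only [List.length_nil]
        rw [if_neg (by omega)]
        simp
      · have hlpos : 0 < l.length := by
          rcases hcon with ⟨a, b, rfl⟩; simp
        have hm2 : 2 ≤ m := by omega
        have h1 : PySem.Int.mod 1 (m:Int) = 1 := by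
          rw [PySem.Int.mod_eq_emod_of_pos hmpos]
          exact Int.emod_eq_of_lt (by omega) (by exact_mod_cast hm2)
        rw [pvP m hm l [] t2 i 1 (hres.trans h1) (by omega) (by omega)]
        rw [pvChunks]
        simp [show ¬(m ≤ l.length ∧ 0 < m) by omega]
    · -- a full chunk: consume m elements, recurse
      rw [not_lt] at hlm
      have hres1 : PySem.Int.mod i (m:Int) = (((m - m + 1) % m : Nat) : Int) := by
        rw [hres, PySem.Int.mod_eq_emod_of_pos hmpos]
        simp only [Nat.sub_self, Nat.zero_add]
        rw [Int.natCast_mod]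
        rfl
      rw [pvQ m hm m hm le_rfl l [] t2 i hlm hres1]
      have hres2 : PySem.Int.mod (i + (m:Int)) (m:Int) = PySem.Int.mod 1 (m:Int) := by
        rw [PySem.Int.mod_eq_emod_of_pos hmpos, PySem.Int.mod_eq_emod_of_pos hmpos]
        have he : (i + (m:Int)) % (m:Int) = i % (m:Int) := by
          conv_lhs => rw [show i + (m:Int) = i + (m:Int) * 1 by ring]
          exact Int.add_mul_emod_self_left i _ 1
        rw [he, ← PySem.Int.mod_eq_emod_of_pos hmpos,
          ← PySem.Int.mod_eq_emod_of_pos hmpos, hres]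
      rw [ih (l.drop m) (by simp; omega) _ _ hres2]
      conv_rhs => rw [pvChunks]
      simp [show m ≤ l.length ∧ 0 < m from ⟨hlm, hm⟩]

-- B's slice loop produces exactly the full chunks.
lemma pvB (m : Nat) (hm : 0 < m) :
    ∀ (q : Nat) (l : List String), q * m ≤ l.length → l.length < q * m + m →
      (List.range q).map (fun k : Nat =>
          PySem.Str.join "†"
            ((PySem.List.slice l (some ((m : Int) * (k : Int))) (some ((m : Int) * (k : Int) + (m : Int)))).map
              PySem.Str.strip)) =
        pvChunks m l := by
  intro q
  induction q with
  | zero =>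
    intro l _ h2
    rw [pvChunks]
    simp only [Nat.zero_mul, Nat.zero_add] at h2
    simp [show ¬(m ≤ l.length ∧ 0 < m) by omega]
  | succ q ih =>
    intro l h1 h2
    rw [Nat.succ_mul] at h1 h2
    have hml : m ≤ l.length := by omega
    rw [List.range_succ_eq_map, List.map_cons, List.map_map]
    have hhead : PySem.List.slice l (some ((m:Int) * ((0:Nat):Int))) (some ((m:Int) * ((0:Nat):Int) + (m:Int))) = l.take m := by
      norm_num
    have htail : ∀ k : Nat, k ∈ List.range q →
        ((fun k : Nat =>
          PySem.Str.join "†"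
            ((PySem.List.slice l (some ((m : Int) * (k : Int))) (some ((m : Int) * (k : Int) + (m : Int)))).map
              PySem.Str.strip)) ∘ Nat.succ) k =
        (fun k : Nat =>
          PySem.Str.join "†"
            ((PySem.List.slice (l.drop m) (some ((m : Int) * (k : Int))) (some ((m : Int) * (k : Int) + (m : Int)))).map
              PySem.Str.strip)) k := by
      intro k _
      simp only [Function.comp_apply]
      congr 2
      have e1 : (m:Int) * ((Nat.succ k : Nat) : Int) = ((m * k + m : Nat) : Int) := by
        push_cast; ring
      have e2 : (m:Int) * ((Nat.succ k : Nat) : Int) + (m:Int)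
          = ((m * k + m : Nat) : Int) + ((m : Nat) : Int) := by push_cast; ring
      rw [e1, PySem.List.slice_natCast_add]
      have e3 : (m:Int) * ((k : Nat) : Int) = ((m * k : Nat) : Int) := by push_cast; ring
      rw [e3, PySem.List.slice_natCast_add]
      rw [List.drop_drop, Nat.add_comm (m * k) m]
    rw [List.map_congr_left htail]
    rw [ih (l.drop m) (by simp; omega) (by simp; omega)]
    conv_rhs => rw [pvChunks]
    rw [if_pos (⟨hml, hm⟩ : m ≤ l.length ∧ 0 < m), hhead]

-- list(range(0, b, s)) is empty for a nonnegative stop and a negative step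
lemma pvRangeNeg (b s : Int) (hb : 0 ≤ b) (hs : s < 0) : PySem.List.pyRange 0 b s = [] := by
  simp [PySem.List.pyRange, show s ≠ 0 by omega, show ¬(0 < s) by omega, show ¬(b < 0) by omega]

-- if no enumerate index is divisible by n, A's loop never flushes list_temp1
lemma pvNoChunk (n : Int) :
    ∀ (l t1 t2 : List String) (i : Int),
      (∀ k : Nat, k < l.length → ¬ (n ∣ (i + k))) →
      (PySem.List.enumerate l i).foldl (pvStepA n) (t1, t2) =
        (t1 ++ l.map PySem.Str.strip, t2) := by
  intro l
  induction l with
  | nil => intro t1 t2 i _; simp [PySem.List.enumerate_nil]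
  | cons x l' ih =>
    intro t1 t2 i hnd
    have h0 : ¬ (n ∣ i) := by
      have := hnd 0 (by simp)
      simpa using this
    have hne : PySem.Int.mod i n ≠ 0 := by
      intro h
      exact h0 ((PySem.Int.mod_eq_zero_iff_dvd i n).mp h)
    rw [PySem.List.enumerate_cons, List.foldl_cons,
      show pvStepA n (t1, t2) (i, x) = (t1 ++ [PySem.Str.strip x], t2) by simp [pvStepA, hne]]
    rw [ih (t1 ++ [PySem.Str.strip x]) t2 (i+1) (by
      intro k hk
      have := hnd (k+1) (by simp; omega)
      push_cast at this ⊢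
      have he : i + 1 + (k:Int) = i + ((k:Int) + 1) := by ring
      rw [he]
      exact this)]
    simp

-- ===== VERDICT (by name: the statement is the Claim_ definition above) =====
theorem split_result_check_luoi_spec : Claim_equal_split_result_check_luoi := by
  intro l n _ hpre
  unfold Spec_split_result_check_luoi
  unfold Pre_split_result_check_luoi at hpre
  rcases hpre with hpre | ⟨hneg, hlen⟩
  case inr =>
    -- n ≤ -1 and len(l) < |n|: neither program ever completes a chunk
    rw [split_result_check_luoi, split_result_check_luoi_alt]
    have hg : ¬ (PySem.List.len l < n) := by
      rw [PySem.List.len_eq]; omega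
    rw [if_neg hg, if_neg hg]
    simp only []
    have hA := pvNoChunk n l [] [] 1 (by
      intro k hk hdvd
      have hpos : (0:Int) < 1 + (k:Int) := by omega
      have hle : -n ≤ 1 + (k:Int) := Int.le_of_dvd hpos ((Int.neg_dvd).mpr hdvd)
      have : (k:Int) < (l.length:Int) := by exact_mod_cast hk
      omega)
    rw [hA]
    have hfull : 0 ≤ PySem.List.len l - PySem.Int.mod (PySem.List.len l) n := by
      rw [PySem.List.len_eq]
      have hb := PySem.Int.mod_neg_bounds (a := ((l.length : Nat) : Int)) (b := n) (by omega)
      omega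
    rw [pvRangeNeg _ n hfull (by omega)]
    simp
  obtain ⟨m, rfl⟩ : ∃ m : Nat, n = (m:Int) :=
    ⟨n.toNat, (Int.toNat_of_nonneg (by omega)).symm⟩
  have hm : 0 < m := by exact_mod_cast hpre
  have hmpos : (0:Int) < (m:Int) := by exact_mod_cast hm
  rw [split_result_check_luoi, split_result_check_luoi_alt]
  by_cases hg : PySem.List.len l < (m:Int)
  · rw [if_pos hg, if_pos hg]
  · rw [if_neg hg, if_neg hg]
    simp only []
    congr 1
    have hA := pvAres m hm l.length l le_rfl [] 1 rfl
    rw [hA, List.nil_append]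
    -- B side
    set L := l.length with hL
    have hlen : PySem.List.len l = (L : Int) := by
      rw [PySem.List.len_eq]
    have hmodc : PySem.Int.mod (L:Int) (m:Int) = ((L % m : Nat) : Int) := by
      exact_mod_cast PySem.Int.mod_natCast L m
    set q := L / m with hq
    have hfull : PySem.List.len l - PySem.Int.mod (PySem.List.len l) (m:Int)
        = ((q * m : Nat) : Int) := by
      rw [hlen, hmodc]
      have h1 : L % m ≤ L := Nat.mod_le L m
      have h2 : q * m + L % m = L := by
        rw [hq, Nat.mul_comm]; exact Nat.div_add_mod L m
      push_cast
      omega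
    rw [hfull, PySem.List.pyRange_of_pos 0 _ hmpos]
    have hcnt : (if (0:Int) < ((q * m : Nat) : Int)
        then ((((q * m : Nat) : Int) - 0 + (m:Int) - 1) / (m:Int)).toNat else 0) = q := by
      by_cases hq0 : q = 0
      · simp [hq0]
      · rw [if_pos (by exact_mod_cast Nat.mul_pos (Nat.pos_of_ne_zero hq0) hm)]
        have : ((q * m : Nat) : Int) - 0 + (m:Int) - 1 = ((q * m + m - 1 : Nat) : Int) := by
          have : 1 ≤ q * m + m := by omega
          push_cast
          omega
        rw [this]
        rw [show ((q * m + m - 1 : Nat) : Int) / ((m:Nat) : Int) = (((q * m + m - 1) / m : Nat) : Int)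
          from (Int.natCast_ediv (q * m + m - 1) m).symm]
        rw [Int.toNat_natCast]
        have he : q * m + m - 1 = m - 1 + q * m := by omega
        rw [he, Nat.add_mul_div_right _ _ hm, Nat.div_eq_of_lt (by omega)]
        omega
    rw [hcnt, List.map_map]
    have hB := pvB m hm q l (by rw [hq, Nat.mul_comm]; exact Nat.mul_div_le L m)
      (by
        have h2 : m * q + L % m = L := Nat.div_add_mod L m
        have h3 : L % m < m := Nat.mod_lt _ hm
        have : q * m = m * q := Nat.mul_comm q m
        omega)
    rw [← hB]
    apply List.map_congr_left
    intro k _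
    simp only [Function.comp_apply]
    norm_num
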